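-- pv_equiv track=rewrite | github.com/Yashwantgokul/ctfsite | challenge9/app.py | split_into_three
-- ===== SOURCE A (Python) =====
-- def split_into_three(value: str):
--     base = len(value) // 3
--     extra = len(value) % 3
--     sizes = [base + (1 if i < extra else 0) for i in range(3)]
--
--     parts = []
--     start = 0
--     for size in sizes:
--         parts.append(value[start:start + size])
--         start += size
--     return parts
-- ===== SOURCE B (Python) =====
-- def split_into_three(value: str):
--     n = len(value)
--     a = (n + 2) // 3
--     b = (2 * n + 2) // 3
--     return [value[:a], value[a:b], value[b:]]
-- ===== Notes on version B (the rewrite author's own statement) =====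
-- stated objective: simpler
-- what changed: Replaced the sizes list and the accumulating loop by two closed-form ceiling boundaries ((n+2)//3 and (2n+2)//3) and three direct slices.
import Mathlib
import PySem

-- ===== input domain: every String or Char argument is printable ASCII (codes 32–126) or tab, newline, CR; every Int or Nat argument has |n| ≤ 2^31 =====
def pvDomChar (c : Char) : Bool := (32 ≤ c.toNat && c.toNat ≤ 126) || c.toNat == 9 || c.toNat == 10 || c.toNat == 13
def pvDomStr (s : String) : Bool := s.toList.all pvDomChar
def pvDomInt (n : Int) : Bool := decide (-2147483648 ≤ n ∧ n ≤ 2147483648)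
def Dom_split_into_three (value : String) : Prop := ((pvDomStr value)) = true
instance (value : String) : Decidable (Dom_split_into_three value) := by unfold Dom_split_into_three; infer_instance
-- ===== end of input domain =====

-- B replaces A's sizes list and accumulating loop by two closed-form boundary indices and three direct slices (objective: simpler).

-- ===== PORT A =====
def split_into_three (value : String) : List String :=
  let base := PySem.Int.floordiv (PySem.Str.len value) 3
  let extra := PySem.Int.mod (PySem.Str.len value) 3
  let sizes := (PySem.List.pyRange 0 3 1).map (fun i => base + (if i < extra then 1 else 0))
  let res := sizes.foldl
    (fun (st : List String × Int) size =>
      (st.1 ++ [PySem.Str.slice value (some st.2) (some (st.2 + size))], st.2 + size))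
    ([], 0)
  res.1

-- ===== PORT B =====
def split_into_three_alt (value : String) : List String :=
  let n := PySem.Str.len value
  let a := PySem.Int.floordiv (n + 2) 3
  let b := PySem.Int.floordiv (2 * n + 2) 3
  [PySem.Str.slice value none (some a),
   PySem.Str.slice value (some a) (some b),
   PySem.Str.slice value (some b) none]

-- ===== PRECONDITION & SPEC =====
def Spec_split_into_three (value : String) (out : List String) : Prop := out = split_into_three_alt value
instance (value : String) (out : List String) : Decidable (Spec_split_into_three value out) := by unfold Spec_split_into_three; infer_instance

-- ===== CLAIM (what is proved, stated in full; the proofs are below) =====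
def Claim_equal_split_into_three : Prop := ∀ (value : String), Dom_split_into_three value → Spec_split_into_three value (split_into_three value)

-- ===== LEMMAS AND PROOFS =====

lemma slice_len_none (l : List Char) (b : Int) (hb : 0 ≤ b) :
    PySem.List.slice l (some b) (some (l.length : Int)) = PySem.List.slice l (some b) none := by
  rw [PySem.List.slice_toNat _ hb (by positivity), PySem.List.slice_from _ hb]
  apply List.take_of_length_le
  simp

-- ===== VERDICT (by name: the statement is the Claim_ definition above) =====
theorem split_into_three_spec : Claim_equal_split_into_three := by
  intro value _
  unfold Spec_split_into_three split_into_three split_into_three_alt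
  simp only [show PySem.List.pyRange 0 3 1 = [0,1,2] from by decide, List.map, List.foldl,
    PySem.Str.slice, PySem.Chars.slice_eq_listSlice, PySem.Str.len_eq,
    PySem.Int.floordiv_eq_ediv_of_pos (show (0:Int) < 3 by norm_num),
    PySem.Int.mod_eq_emod_of_pos (show (0:Int) < 3 by norm_num)]
  set l := value.toList with hl
  have h1 : (0 : Int) + ((l.length : Int) / 3 + if 0 < (l.length : Int) % 3 then 1 else 0)
      = ((l.length : Int) + 2) / 3 := by split_ifs <;> omega
  have h2 : (0 : Int) + ((l.length : Int) / 3 + if 0 < (l.length : Int) % 3 then 1 else 0)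
      + ((l.length : Int) / 3 + if 1 < (l.length : Int) % 3 then 1 else 0)
      = (2 * (l.length : Int) + 2) / 3 := by split_ifs <;> omega
  have h3 : (0 : Int) + ((l.length : Int) / 3 + if 0 < (l.length : Int) % 3 then 1 else 0)
      + ((l.length : Int) / 3 + if 1 < (l.length : Int) % 3 then 1 else 0)
      + ((l.length : Int) / 3 + if 2 < (l.length : Int) % 3 then 1 else 0)
      = (l.length : Int) := by split_ifs <;> omega
  rw [h3, h2, h1]
  rw [slice_len_none l _ (by positivity), PySem.List.slice_zero_start]
  simp
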